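-- pv_equiv track=rewrite | github.com/Jackstone92/ProblemSolvingAssignment | assignment.py | check_if_quotations
-- ===== SOURCE A (Python) =====
-- def remove(string, to_remove):
--     """ Removes characters from strings """
--     new_string = str("")
--     i = 0
--     while i < len(string):
--         if string[i : i + len(to_remove)] == to_remove:
--             i += len(to_remove)
--         else:
--             new_string += string[i]
--             i += 1
--     return new_string
--
-- def check_if_quotations(string):
--     """ Checks to see if any quotations and removes them """
--     quote_found_double = False
--     quote_found_single = False
--     for i in range(len(string)):
--         if string[i] == '"':
--             quote_found_double = True
--         if string[i] == "'":
--             quote_found_single = True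
--     if quote_found_double == True:
--         string = remove(string, '"')
--     if quote_found_single == True:
--         string = remove(string, "'")
--     return string
-- ===== SOURCE B (Python) =====
-- def check_if_quotations(string):
--     """ Checks to see if any quotations and removes them """
--     return ''.join(c for c in string if c != '"' and c != "'")
-- ===== Notes on version B (the rewrite author's own statement) =====
-- stated objective: simpler
-- what changed: Replaced A's detect-flags loop plus per-quote substring-matching remove passes by a single filtering pass that keeps every character that is not a double or single quote.
import Mathlib
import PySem

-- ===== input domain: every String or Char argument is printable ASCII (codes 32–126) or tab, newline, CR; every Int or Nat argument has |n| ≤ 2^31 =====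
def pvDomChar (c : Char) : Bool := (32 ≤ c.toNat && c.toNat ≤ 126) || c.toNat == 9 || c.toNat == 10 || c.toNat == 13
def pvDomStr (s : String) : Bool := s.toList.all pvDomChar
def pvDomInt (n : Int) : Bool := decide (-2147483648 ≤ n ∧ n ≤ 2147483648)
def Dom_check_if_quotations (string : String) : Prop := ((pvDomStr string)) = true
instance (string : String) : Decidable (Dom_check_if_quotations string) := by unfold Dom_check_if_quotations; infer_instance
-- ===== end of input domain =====

-- B replaces A's flag-detection loop + per-quote substring-removal passes by one filtering pass (simpler; same cost).

-- ===== PORT A =====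
-- A's 'remove' while-loop: index i scans s, skipping a match of t or copying one char; fuel bounds
-- the iteration count (for nonempty t the loop runs at most s.length + 1 times, so fuel never runs out).
def pvRemoveAux (s t : List Char) : Nat → Nat → List Char → List Char
  | 0, _, acc => acc
  | fuel + 1, i, acc =>
    if i < s.length then
      if (s.drop i).take t.length == t then
        pvRemoveAux s t fuel (i + t.length) acc
      else
        pvRemoveAux s t fuel (i + 1) (acc ++ [s.getD i ' '])
    else acc

def pvRemove (s t : List Char) : List Char := pvRemoveAux s t (s.length + 1) 0 []

def check_if_quotations (string : String) : String :=
  let l := string.toList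
  -- the for-loop setting quote_found_double / quote_found_single
  let flags := l.foldl (fun (p : Bool × Bool)  c =>
      (if c == '"' then true else p.1, if c == '\'' then true else p.2)) (false, false)
  let l1 := if flags.1 then pvRemove l ['"'] else l
  let l2 := if flags.2 then pvRemove l1 ['\''] else l1
  String.ofList l2

-- ===== PORT B =====
def check_if_quotations_alt (string : String) : String :=
  String.ofList (string.toList.filter (fun c => !(c == '"') && !(c == '\'')))

-- ===== PRECONDITION & SPEC =====
def Spec_check_if_quotations (string : String) (out : String) : Prop := out = check_if_quotations_alt string
instance (string : String) (out : String) : Decidable (Spec_check_if_quotations string out) := by unfold Spec_check_if_quotations; infer_instance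

-- ===== CLAIM (what is proved, stated in full; the proofs are below) =====
def Claim_equal_check_if_quotations : Prop := ∀ (string : String), Dom_check_if_quotations string → Spec_check_if_quotations string (check_if_quotations string)

-- ===== LEMMAS AND PROOFS =====

theorem pvRemoveAux_filter (c : Char) (s : List Char) :
    ∀ (fuel i : Nat) (acc : List Char), s.length - i < fuel →
      pvRemoveAux s [c] fuel i acc = acc ++ (s.drop i).filter (fun x => !(x == c)) := by
  intro fuel
  induction fuel with
  | zero => intro i acc h; omega
  | succ fuel ih =>
    intro i acc h
    unfold pvRemoveAux
    by_cases hi : i < s.length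
    · rw [if_pos hi]
      simp only [List.length_cons, List.length_nil]
      have hdrop : s.drop i = s[i] :: s.drop (i + 1) := List.drop_eq_getElem_cons hi
      have htake : (s.drop i).take 1 = [s[i]] := by rw [hdrop]; rfl
      rw [htake]
      by_cases he : s[i] = c
      · rw [if_pos (by simp [he])]
        rw [ih (i + 1) acc (by omega), hdrop, List.filter_cons]
        simp [he]
      · rw [if_neg (by simp [he])]
        rw [ih (i + 1) _ (by omega), hdrop, List.filter_cons]
        simp [List.getD, List.getElem?_eq_getElem hi, he]
    · rw [if_neg hi]
      rw [List.drop_eq_nil_of_le (by omega)]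
      simp

theorem pvRemove_filter (c : Char) (s : List Char) :
    pvRemove s [c] = s.filter (fun x => !(x == c)) := by
  unfold pvRemove
  rw [pvRemoveAux_filter c s (s.length + 1) 0 [] (by omega)]
  simp

theorem pvFlags_contains (l : List Char) :
    ∀ (d s : Bool),
      l.foldl (fun (p : Bool × Bool) c =>
        (if c == '"' then true else p.1, if c == '\'' then true else p.2)) (d, s)
      = (d || l.contains '"', s || l.contains '\'') := by
  induction l with
  | nil => intro d s; simp
  | cons x xs ih =>
    intro d s
    simp only [List.foldl_cons, ih, List.contains_cons]
    by_cases h1 : x = '"'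
    · subst h1
      simp
    · by_cases h2 : x = '\''
      · subst h2
        simp
      · have b1 : ('"' == x) = false := by simp [Ne.symm h1]
        have b2 : ('\'' == x) = false := by simp [Ne.symm h2]
        simp [h1, h2, b1, b2]

-- ===== VERDICT (by name: the statement is the Claim_ definition above) =====
theorem check_if_quotations_spec : Claim_equal_check_if_quotations := by
  intro string _
  unfold Spec_check_if_quotations check_if_quotations check_if_quotations_alt
  simp only [pvFlags_contains]
  set l := string.toList with hl
  have step1 : (if (false || l.contains '"') = true then pvRemove l ['"'] else l)
      = l.filter (fun x => !(x == '"')) := by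
    by_cases h : ('"' : Char) ∈ l
    · rw [if_pos (by simp [h]), pvRemove_filter]
    · rw [if_neg (by simp [h])]
      refine (List.filter_eq_self.mpr ?_).symm
      intro a ha
      simp only [Bool.not_eq_eq_eq_not, Bool.not_true, beq_eq_false_iff_ne]
      rintro rfl
      exact h ha
  rw [step1]
  have step2 : (if (false || l.contains '\'') = true
        then pvRemove (l.filter (fun x => !(x == '"'))) ['\'']
        else l.filter (fun x => !(x == '"')))
      = (l.filter (fun x => !(x == '"'))).filter (fun x => !(x == '\'')) := by
    by_cases h : ('\'' : Char) ∈ l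
    · rw [if_pos (by simp [h]), pvRemove_filter]
    · rw [if_neg (by simp [h])]
      refine (List.filter_eq_self.mpr ?_).symm
      intro a ha
      simp only [Bool.not_eq_eq_eq_not, Bool.not_true, beq_eq_false_iff_ne]
      rintro rfl
      exact h (List.mem_filter.mp ha).1
  rw [step2, List.filter_filter]
  congr 1
  exact List.filter_congr (fun a _ => Bool.and_comm _ _)
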